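-- pv_equiv track=rewrite | github.com/gcomneno/pet | tools/pet_family_combinations.py | pet_profile
-- ===== SOURCE A (Python) =====
-- from typing import Iterable, List, Tuple
--
-- def factor_exponents(n: int) -> List[int]:
--     exponents: List[int] = []
--     m = n
--     count = 0
--     while m % 2 == 0:
--         count += 1
--         m //= 2
--     if count:
--         exponents.append(count)
--     p = 3
--     while p * p <= m:
--         count = 0
--         while m % p == 0:
--             count += 1
--             m //= p
--         if count:
--             exponents.append(count)
--         p += 2
--     if m > 1:
--         exponents.append(1)
--     exponents.sort(reverse=True)
--     return exponents
--
-- def pet_profile(n: int) -> Tuple[int, ...]: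
--     exponents = factor_exponents(n)
--     if not exponents:
--         return tuple()
--     h = exponents[0]
--     profile = []
--     for level in range(1, h + 1):
--         profile.append(sum(1 for e in exponents if e >= level))
--     return tuple(profile)
-- ===== SOURCE B (Python) =====
-- from typing import List, Tuple
--
-- def _strip(m: int, p: int) -> Tuple[int, int]:
--     # recursively divide out p, returning (exponent, remaining cofactor)
--     if m % p == 0:
--         e, r = _strip(m // p, p)
--         return e + 1, r
--     return 0, m
--
-- def _bump(profile: List[int], e: int) -> List[int]:
--     # merge one exponent e into the conjugate profile: pad to length e, add 1 to the first e cells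
--     padded = profile + [0] * (e - len(profile))
--     return [x + 1 if i < e else x for i, x in enumerate(padded)]
--
-- def pet_profile(n: int) -> Tuple[int, ...]:
--     profile: List[int] = []
--     e, m = _strip(n, 2)
--     if e:
--         profile = _bump(profile, e)
--     p = 3
--     while p * p <= m:
--         e, m = _strip(m, p)
--         if e:
--             profile = _bump(profile, e)
--         p += 2
--     if m > 1:
--         profile = _bump(profile, 1)
--     return tuple(profile)
-- ===== Notes on version B (the rewrite author's own statement) =====
-- stated objective: alternative
-- what changed: B never builds or sorts the exponent list: during trial division (recursive strip-out of each prime, vs A's iterative inner loop) it merges each exponent e directly into the conjugate profile by padding to length e and incrementing the first e cells, so A's sort and per-level rescan of the exponents disappear.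
import Mathlib
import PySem

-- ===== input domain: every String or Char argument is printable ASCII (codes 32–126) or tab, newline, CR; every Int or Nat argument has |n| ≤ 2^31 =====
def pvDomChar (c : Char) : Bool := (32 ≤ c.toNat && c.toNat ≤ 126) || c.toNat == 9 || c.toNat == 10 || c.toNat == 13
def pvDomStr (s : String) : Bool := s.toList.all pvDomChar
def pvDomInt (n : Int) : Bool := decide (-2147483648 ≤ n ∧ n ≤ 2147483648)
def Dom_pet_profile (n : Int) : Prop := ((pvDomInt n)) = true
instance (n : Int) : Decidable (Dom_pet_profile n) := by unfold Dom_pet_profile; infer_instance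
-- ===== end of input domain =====

-- B drops A's exponent list, its sort and its per-level rescan: each prime's exponent is
-- merged directly into the conjugate profile (objective: alternative algorithm).

-- ===== PORT A =====
-- 'while m % p == 0: count += 1; m //= p'. The fuel is a totality guard only: each
-- iteration divides |m| by p ≥ 2, so fuel |m|+1 is never exhausted on any input where
-- the Python loop terminates (Python diverges only at m = 0).
def divOut (fuel : Nat) (p m count : Int) : Int × Int :=
  match fuel with
  | 0 => (count, m)
  | fuel + 1 =>
    if PySem.Int.mod m p = 0 then
      divOut fuel p (PySem.Int.floordiv m p) (count + 1)
    else
      (count, m)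

-- 'p = 3; while p * p <= m: …; p += 2'. Fuel |m|+1 is a totality guard only.
def oddLoop (fuel : Nat) (p m : Int) (exps : List Int) : List Int × Int :=
  match fuel with
  | 0 => (exps, m)
  | fuel + 1 =>
    if p * p ≤ m then
      let r := divOut (m.natAbs + 1) p m 0
      oddLoop fuel (p + 2) r.2 (if r.1 ≠ 0 then exps ++ [r.1] else exps)
    else
      (exps, m)

def factor_exponents (n : Int) : List Int :=
  let r2 := divOut (n.natAbs + 1) 2 n 0
  let exps0 := if r2.1 ≠ 0 then [r2.1] else ([] : List Int)
  let r := oddLoop (r2.2.natAbs + 1) 3 r2.2 exps0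
  let exps1 := if r.2 > 1 then r.1 ++ [(1 : Int)] else r.1
  PySem.List.sorted exps1 (fun x => x) true

def pet_profile (n : Int) : List Int :=
  let exps := factor_exponents n
  if exps = [] then []
  else
    let h := PySem.List.pyGetD exps 0 0
    (PySem.List.pyRange 1 (h + 1) 1).foldl
      (fun acc level => acc ++ [(exps.map (fun e => if level ≤ e then (1 : Int) else 0)).sum]) []

-- ===== PORT B =====
-- '_strip': recursive divide-out of p; the fuel mirrors Python's recursion depth bound
-- (totality guard only, never exhausted for m ≠ 0).
def strip (fuel : Nat) (m p : Int) : Int × Int :=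
  match fuel with
  | 0 => (0, m)
  | fuel + 1 =>
    if PySem.Int.mod m p = 0 then
      ((strip fuel (PySem.Int.floordiv m p) p).1 + 1, (strip fuel (PySem.Int.floordiv m p) p).2)
    else
      (0, m)

-- '_bump': pad the profile with zeros to length e, then add 1 to the first e cells.
def bump (profile : List Int) (e : Int) : List Int :=
  let padded := profile ++ List.replicate (e - (profile.length : Int)).toNat 0
  padded.mapIdx (fun i x => if (i : Int) < e then x + 1 else x)

-- B's main while-loop over odd trial divisors, carrying the profile.
def profLoop (fuel : Nat) (p m : Int) (profile : List Int) : List Int × Int :=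
  match fuel with
  | 0 => (profile, m)
  | fuel + 1 =>
    if p * p ≤ m then
      let r := strip (m.natAbs + 1) m p
      profLoop fuel (p + 2) r.2 (if r.1 ≠ 0 then bump profile r.1 else profile)
    else
      (profile, m)

def pet_profile_alt (n : Int) : List Int :=
  let r2 := strip (n.natAbs + 1) n 2
  let prof0 := if r2.1 ≠ 0 then bump [] r2.1 else ([] : List Int)
  let r := profLoop (r2.2.natAbs + 1) 3 r2.2 prof0
  if r.2 > 1 then bump r.1 1 else r.1

-- ===== PRECONDITION & SPEC =====
def Spec_pet_profile (n : Int) (out : List Int) : Prop := out = pet_profile_alt n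
instance (n : Int) (out : List Int) : Decidable (Spec_pet_profile n out) := by unfold Spec_pet_profile; infer_instance

-- ===== CLAIM (what is proved, stated in full; the proofs are below) =====
def Claim_equal_pet_profile : Prop := ∀ (n : Int), Dom_pet_profile n → Spec_pet_profile n (pet_profile n)

-- ===== LEMMAS AND PROOFS =====

-- count of exponents ≥ k, as Int
def cnt (E : List Int) (k : Int) : Int := (E.countP (fun e => decide (k ≤ e)) : Int)

-- max of the (nonnegative) exponents, 0 for []
def maxNat (E : List Int) : Nat := E.foldr (fun e a => max e.toNat a) 0

-- the conjugate partition of the exponent multiset E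
def conj (E : List Int) : List Int := (List.range (maxNat E)).map (fun i : Nat => cnt E ((i : Int) + 1))

theorem divOut_eq_strip (fuel : Nat) (p m c : Int) :
    divOut fuel p m c = (c + (strip fuel m p).1, (strip fuel m p).2) := by
  induction fuel generalizing m c with
  | zero => simp [divOut, strip]
  | succ fuel ih =>
    simp only [divOut, strip]
    split_ifs with h
    · rw [ih]; simp only [Prod.mk.injEq]; constructor
      · ring
      · trivial
    · simp

theorem strip_nonneg (fuel : Nat) (m p : Int) : 0 ≤ (strip fuel m p).1 := by
  induction fuel generalizing m with
  | zero => simp [strip]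
  | succ fuel ih =>
    simp only [strip]
    split_ifs with h
    · have := ih (PySem.Int.floordiv m p); omega
    · simp

theorem foldr_max_init (E : List Int) (i : Nat) :
    E.foldr (fun e a => max e.toNat a) i = max (maxNat E) i := by
  induction E generalizing i with
  | nil => simp [maxNat]
  | cons x t ih =>
    simp only [List.foldr_cons, maxNat] at ih ⊢
    rw [ih]; omega

theorem maxNat_append_singleton (E : List Int) (x : Int) (hx : 1 ≤ x) :
    maxNat (E ++ [x]) = max (maxNat E) x.toNat := by
  unfold maxNat
  rw [List.foldr_append]
  simp only [List.foldr_cons, List.foldr_nil]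
  rw [show max x.toNat 0 = x.toNat by omega]
  exact foldr_max_init E x.toNat

theorem le_maxNat_of_mem (E : List Int) (e : Int) (he : e ∈ E) : e.toNat ≤ maxNat E := by
  induction E with
  | nil => simp at he
  | cons x t ih =>
    rcases List.mem_cons.mp he with h | h
    · subst h; simp [maxNat]
    · have := ih h; simp [maxNat] at *; omega

theorem maxNat_le (E : List Int) (b : Nat) (h : ∀ e ∈ E, e.toNat ≤ b) : maxNat E ≤ b := by
  induction E with
  | nil => simp [maxNat]
  | cons x t ih =>
    have hx := h x (by simp)
    have ht := ih (fun e he => h e (by simp [he]))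
    simp [maxNat] at *; omega

theorem cnt_eq_zero (E : List Int) (k : Int) (hk : (maxNat E : Int) < k) : cnt E k = 0 := by
  unfold cnt
  have : E.countP (fun e => decide (k ≤ e)) = 0 := by
    rw [List.countP_eq_zero]
    intro e he
    have h1 : e ≤ (e.toNat : Int) := Int.self_le_toNat e
    have h2 := le_maxNat_of_mem E e he
    simp only [decide_eq_true_eq]
    omega
  simp [this]

theorem cnt_append (E : List Int) (x k : Int) :
    cnt (E ++ [x]) k = cnt E k + (if k ≤ x then 1 else 0) := by
  unfold cnt
  rw [List.countP_append]
  by_cases h : k ≤ x <;> simp [h]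

theorem length_conj (E : List Int) : (conj E).length = maxNat E := by
  simp [conj]

theorem getElem_conj (E : List Int) (i : Nat) (hi : i < (conj E).length) :
    (conj E)[i] = cnt E ((i : Int) + 1) := by
  unfold conj at hi ⊢
  rw [List.getElem_map, List.getElem_range]

theorem bump_conj (E : List Int) (x : Int) (hx : 1 ≤ x) :
    bump (conj E) x = conj (E ++ [x]) := by
  have hmaxapp : maxNat (E ++ [x]) = max (maxNat E) x.toNat := maxNat_append_singleton E x hx
  have hlb : (bump (conj E) x).length = max (maxNat E) x.toNat := by
    simp [bump, length_conj]
    omega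
  apply List.ext_getElem
  · rw [hlb, length_conj, hmaxapp]
  · intro i h1 h2
    have hi2 : i < max (maxNat E) x.toNat := by rw [hlb] at h1; exact h1
    rw [getElem_conj _ _ h2, cnt_append]
    simp only [bump, List.getElem_mapIdx]
    by_cases hi : i < maxNat E
    · rw [List.getElem_append_left (by rw [length_conj]; exact hi)]
      rw [getElem_conj _ _ (by rw [length_conj]; exact hi)]
      by_cases hix : (i : Int) < x
      · rw [if_pos hix, if_pos (by omega)]
      · rw [if_neg hix, if_neg (by omega)]
        ring
    · rw [List.getElem_append_right (by rw [length_conj]; omega)]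
      rw [List.getElem_replicate]
      have hix : (i : Int) < x := by omega
      rw [if_pos hix, if_pos (by omega)]
      rw [cnt_eq_zero E ((i : Int) + 1) (by omega)]

theorem conj_nil : conj [] = [] := by simp [conj, maxNat]

theorem profLoop_oddLoop (fuel : Nat) (p m : Int) (E : List Int) (hE : ∀ e ∈ E, 1 ≤ e) :
    profLoop fuel p m (conj E)
      = (conj (oddLoop fuel p m E).1, (oddLoop fuel p m E).2)
    ∧ ∀ e ∈ (oddLoop fuel p m E).1, 1 ≤ e := by
  induction fuel generalizing p m E with
  | zero => exact ⟨rfl, hE⟩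
  | succ fuel ih =>
    simp only [profLoop, oddLoop, divOut_eq_strip, zero_add]
    by_cases h : p * p ≤ m
    · rw [if_pos h, if_pos h]
      by_cases hz : (strip (m.natAbs + 1) m p).1 ≠ 0
      · rw [if_pos hz, if_pos hz,
            bump_conj E _ (by have := strip_nonneg (m.natAbs + 1) m p; omega)]
        refine ih _ _ _ (fun e he => ?_)
        rcases List.mem_append.mp he with h' | h'
        · exact hE e h'
        · have := strip_nonneg (m.natAbs + 1) m p
          simp at h'; omega
      · rw [if_neg hz, if_neg hz]
        exact ih _ _ _ hE
    · rw [if_neg h, if_neg h]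
      exact ⟨rfl, hE⟩

theorem sum_ite_eq_cnt (xs : List Int) (c : Int) :
    (xs.map (fun e => if c ≤ e then (1 : Int) else 0)).sum = cnt xs c := by
  induction xs with
  | nil => simp [cnt]
  | cons x t ih =>
    simp only [List.map_cons, List.sum_cons, ih, cnt, List.countP_cons]
    by_cases h : c ≤ x
    · simp [h]
      ring
    · simp [h]

theorem aside (E : List Int) (hE : ∀ e ∈ E, 1 ≤ e) :
    (let exps := PySem.List.sorted E (fun x => x) true
     if exps = [] then []
     else
       let h := PySem.List.pyGetD exps 0 0
       (PySem.List.pyRange 1 (h + 1) 1).foldl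
         (fun acc level => acc ++ [(exps.map (fun e => if level ≤ e then (1 : Int) else 0)).sum]) [])
    = conj E := by
  cases hs : PySem.List.sorted E (fun x => x) true with
  | nil =>
    have hEnil : E = [] := (PySem.List.sorted_eq_nil_iff E (fun x => x) true).mp hs
    subst hEnil
    simp [conj_nil]
  | cons h0 t =>
    rw [if_neg (by simp)]
    rw [PySem.List.pyGetD_zero_cons]
    rw [PySem.List.foldl_append_singleton_eq_map]
    have hmem : h0 ∈ E := by
      rw [← PySem.List.mem_sorted E (fun x => x) true, hs]
      exact List.mem_cons_self
    have hub : ∀ y ∈ E, y ≤ h0 :=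
      PySem.List.key_head_sorted_rev_ge (xs := E) (key := fun x => x) (m := h0) (t := t) hs
    have h0pos : 1 ≤ h0 := hE h0 hmem
    have hmax : maxNat E = h0.toNat :=
      le_antisymm
        (maxNat_le E h0.toNat (fun e he => by have := hub e he; omega))
        (le_maxNat_of_mem E h0 hmem)
    unfold conj
    rw [hmax, PySem.List.pyRange_one, List.map_map]
    rw [show (h0 + 1 - 1).toNat = h0.toNat by omega]
    simp only [List.nil_append]
    apply List.map_congr_left
    intro k _
    simp only [Function.comp]
    rw [sum_ite_eq_cnt (h0 :: t) (1 + (k : Int))]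
    rw [show (1 + (k : Int)) = (k : Int) + 1 by ring]
    unfold cnt
    have hperm : (PySem.List.sorted E (fun x => x) true).Perm E :=
      PySem.List.sorted_perm E (fun x => x) true
    rw [hs] at hperm
    rw [hperm.countP_eq]

theorem pet_profile_eq_alt (n : Int) : pet_profile n = pet_profile_alt n := by
  unfold pet_profile pet_profile_alt factor_exponents
  simp only [divOut_eq_strip, zero_add]
  have hnn2 := strip_nonneg (n.natAbs + 1) n 2
  set s := strip (n.natAbs + 1) n 2 with hsdef
  set E0 : List Int := if s.1 ≠ 0 then [s.1] else [] with hE0def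
  have hE0 : (if s.1 ≠ 0 then bump [] s.1 else ([] : List Int)) = conj E0 := by
    rw [hE0def]
    by_cases hz : s.1 ≠ 0
    · rw [if_pos hz, if_pos hz]
      have hb := bump_conj [] s.1 (by omega)
      rw [conj_nil, List.nil_append] at hb
      exact hb
    · rw [if_neg hz, if_neg hz, conj_nil]
  rw [hE0]
  have hpos0 : ∀ e ∈ E0, 1 ≤ e := by
    rw [hE0def]
    by_cases hz : s.1 ≠ 0
    · rw [if_pos hz]; intro e he; simp at he; omega
    · rw [if_neg hz]; intro e he; simp at he
  have hply := profLoop_oddLoop (s.2.natAbs + 1) 3 s.2 E0 hpos0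
  rw [hply.1]
  set r := oddLoop (s.2.natAbs + 1) 3 s.2 E0 with hrdef
  have hfin : (if r.2 > 1 then bump (conj r.1) 1 else conj r.1)
      = conj (if r.2 > 1 then r.1 ++ [(1 : Int)] else r.1) := by
    split_ifs with hgt
    · exact bump_conj r.1 1 le_rfl
    · rfl
  rw [hfin]
  exact (aside (if r.2 > 1 then r.1 ++ [(1 : Int)] else r.1) (by
    intro e he
    split_ifs at he with hgt
    · rcases List.mem_append.mp he with h' | h'
      · exact hply.2 e h'
      · simp at h'; omega
    · exact hply.2 e he))

-- ===== VERDICT (by name: the statement is the Claim_ definition above) =====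
theorem pet_profile_spec : Claim_equal_pet_profile := by
  intro n _
  unfold Spec_pet_profile
  exact pet_profile_eq_alt n
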